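-- pv_equiv track=rewrite | github.com/AuraquanTech/indexer-api | src/secrets_scanner/entropy.py | detect_charset
-- ===== SOURCE A (Python) =====
-- CHARSETS = {
--     "hex": "0123456789abcdefABCDEF",
--     "base64": "ABCDEFGHIJKLMNOPQRSTUVWXYZabcdefghijklmnopqrstuvwxyz0123456789+/=",
--     "base64url": "ABCDEFGHIJKLMNOPQRSTUVWXYZabcdefghijklmnopqrstuvwxyz0123456789-_",
--     "alphanumeric": "ABCDEFGHIJKLMNOPQRSTUVWXYZabcdefghijklmnopqrstuvwxyz0123456789",
--     "numeric": "0123456789",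
-- }
--
-- def detect_charset(s: str) -> str:
--     """Detect which character set a string belongs to."""
--     if all(c in CHARSETS["numeric"] for c in s):
--         return "numeric"
--     if all(c in CHARSETS["hex"] for c in s):
--         return "hex"
--     if all(c in CHARSETS["base64url"] for c in s):
--         return "base64url"
--     if all(c in CHARSETS["base64"] for c in s):
--         return "base64"
--     if all(c in CHARSETS["alphanumeric"] + "_-" for c in s):
--         return "alphanumeric"
--     return "mixed"
-- ===== SOURCE B (Python) =====
-- _B64 = "ABCDEFGHIJKLMNOPQRSTUVWXYZabcdefghijklmnopqrstuvwxyz0123456789"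
--
-- def _mask(c):
--     """Bitmask of the categories that admit character c (bit i = category i)."""
--     m = 0
--     if c in "0123456789":
--         m |= 1   # numeric
--     if c in "0123456789abcdefABCDEF":
--         m |= 2   # hex
--     if c in _B64 + "-_":
--         m |= 4   # base64url
--     if c in _B64 + "+/=":
--         m |= 8   # base64
--     if c in _B64 + "_-":
--         m |= 16  # alphanumeric (extended)
--     return m
--
-- def detect_charset(s: str) -> str:
--     """Detect which character set a string belongs to."""
--     m = 31
--     for c in s:
--         m &= _mask(c)
--     if m & 1:
--         return "numeric"
--     if m & 2:
--         return "hex"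
--     if m & 4:
--         return "base64url"
--     if m & 8:
--         return "base64"
--     if m & 16:
--         return "alphanumeric"
--     return "mixed"
-- ===== Notes on version B (the rewrite author's own statement) =====
-- stated objective: alternative
-- what changed: B makes a single pass over the string maintaining a bitmask of still-possible categories (ANDing in each character's category mask), then returns the first surviving bit, instead of A's five staged full-string scans in a cascade.
import Mathlib
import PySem

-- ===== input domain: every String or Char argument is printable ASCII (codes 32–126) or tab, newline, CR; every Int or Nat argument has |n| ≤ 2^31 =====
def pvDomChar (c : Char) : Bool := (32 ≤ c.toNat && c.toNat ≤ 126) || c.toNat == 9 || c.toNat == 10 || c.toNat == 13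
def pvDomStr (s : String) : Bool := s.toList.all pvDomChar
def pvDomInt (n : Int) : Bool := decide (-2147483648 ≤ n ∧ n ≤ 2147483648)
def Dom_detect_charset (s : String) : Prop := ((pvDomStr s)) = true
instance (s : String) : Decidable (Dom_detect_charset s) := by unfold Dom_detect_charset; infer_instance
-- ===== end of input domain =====

-- B replaces A's five staged full-string scans with a single pass that ANDs per-character category bitmasks and returns the first surviving category bit.


-- ===== PORT A =====
-- 'c in CHARSETS[...]' on a single character is membership; exact via List.contains on the charset's characters.
def detect_charset (s : String) : String :=
  if s.toList.all (fun c => ("0123456789").toList.contains c) then "numeric"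
  else if s.toList.all (fun c => ("0123456789abcdefABCDEF").toList.contains c) then "hex"
  else if s.toList.all (fun c => ("ABCDEFGHIJKLMNOPQRSTUVWXYZabcdefghijklmnopqrstuvwxyz0123456789-_").toList.contains c) then "base64url"
  else if s.toList.all (fun c => ("ABCDEFGHIJKLMNOPQRSTUVWXYZabcdefghijklmnopqrstuvwxyz0123456789+/=").toList.contains c) then "base64"
  else if s.toList.all (fun c => ("ABCDEFGHIJKLMNOPQRSTUVWXYZabcdefghijklmnopqrstuvwxyz0123456789" ++ "_-").toList.contains c) then "alphanumeric"
  else "mixed"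

-- ===== PORT B =====
-- Source B's per-character category bitmask (bit i = category i).
def pvMask (c : Char) : Nat :=
  let m : Nat := 0
  let m := if ("0123456789").toList.contains c then m ||| 1 else m
  let m := if ("0123456789abcdefABCDEF").toList.contains c then m ||| 2 else m
  let m := if (("ABCDEFGHIJKLMNOPQRSTUVWXYZabcdefghijklmnopqrstuvwxyz0123456789" ++ "-_")).toList.contains c then m ||| 4 else m
  let m := if (("ABCDEFGHIJKLMNOPQRSTUVWXYZabcdefghijklmnopqrstuvwxyz0123456789" ++ "+/=")).toList.contains c then m ||| 8 else m
  let m := if (("ABCDEFGHIJKLMNOPQRSTUVWXYZabcdefghijklmnopqrstuvwxyz0123456789" ++ "_-")).toList.contains c then m ||| 16 else m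
  m

def detect_charset_alt (s : String) : String :=
  let m := s.toList.foldl (fun m c => m &&& pvMask c) 31
  if m &&& 1 ≠ 0 then "numeric"
  else if m &&& 2 ≠ 0 then "hex"
  else if m &&& 4 ≠ 0 then "base64url"
  else if m &&& 8 ≠ 0 then "base64"
  else if m &&& 16 ≠ 0 then "alphanumeric"
  else "mixed"

-- ===== PRECONDITION & SPEC =====
def Spec_detect_charset (s : String) (out : String) : Prop := out = detect_charset_alt s
instance (s : String) (out : String) : Decidable (Spec_detect_charset s out) := by unfold Spec_detect_charset; infer_instance

-- ===== CLAIM (what is proved, stated in full; the proofs are below) =====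
def Claim_equal_detect_charset : Prop := ∀ (s : String), Dom_detect_charset s → Spec_detect_charset s (detect_charset s)

-- ===== LEMMAS AND PROOFS =====
-- Bit i of the folded mask is set iff every character passes category i's membership test.
theorem foldl_mask_testBit (i : Nat) (xs : List Char) (m : Nat) :
    (xs.foldl (fun m c => m &&& pvMask c) m).testBit i
      = (m.testBit i && xs.all (fun c => (pvMask c).testBit i)) := by
  induction xs generalizing m with
  | nil => simp
  | cons c cs ih => simp [ih, Nat.testBit_and, Bool.and_assoc]

-- pvMask abstracted over its five Boolean membership tests.
def pvMaskOf (b0 b1 b2 b3 b4 : Bool) : Nat :=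
  let m : Nat := 0
  let m := if b0 then m ||| 1 else m
  let m := if b1 then m ||| 2 else m
  let m := if b2 then m ||| 4 else m
  let m := if b3 then m ||| 8 else m
  let m := if b4 then m ||| 16 else m
  m

theorem maskOf_bits (b0 b1 b2 b3 b4 : Bool) :
    (pvMaskOf b0 b1 b2 b3 b4).testBit 0 = b0
  ∧ (pvMaskOf b0 b1 b2 b3 b4).testBit 1 = b1
  ∧ (pvMaskOf b0 b1 b2 b3 b4).testBit 2 = b2
  ∧ (pvMaskOf b0 b1 b2 b3 b4).testBit 3 = b3
  ∧ (pvMaskOf b0 b1 b2 b3 b4).testBit 4 = b4 := by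
  cases b0 <;> cases b1 <;> cases b2 <;> cases b3 <;> cases b4 <;> decide

theorem pvMask_eq (c : Char) :
    pvMask c = pvMaskOf (("0123456789").toList.contains c)
      (("0123456789abcdefABCDEF").toList.contains c)
      ((("ABCDEFGHIJKLMNOPQRSTUVWXYZabcdefghijklmnopqrstuvwxyz0123456789" ++ "-_")).toList.contains c)
      ((("ABCDEFGHIJKLMNOPQRSTUVWXYZabcdefghijklmnopqrstuvwxyz0123456789" ++ "+/=")).toList.contains c)
      ((("ABCDEFGHIJKLMNOPQRSTUVWXYZabcdefghijklmnopqrstuvwxyz0123456789" ++ "_-")).toList.contains c) := rfl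

theorem and_two_pow_ne (m i : Nat) : (m &&& 2 ^ i ≠ 0) ↔ m.testBit i = true := by
  rw [Nat.and_two_pow]
  cases h : m.testBit i
  · simp [h]
  · simp [h, (Nat.two_pow_pos i).ne']

-- The bit-i test on the folded mask is A's staged all-scan for category i.
theorem fold_cond (xs : List Char) (i k : Nat) (hk : k = 2 ^ i) (hi : i < 5) (p : Char → Bool)
    (hp : ∀ c, (pvMask c).testBit i = p c) :
    (xs.foldl (fun m c => m &&& pvMask c) 31 &&& k ≠ 0) ↔ (xs.all p = true) := by
  subst hk
  rw [and_two_pow_ne, foldl_mask_testBit]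
  have h31 : (31 : Nat).testBit i = true := by interval_cases i <;> decide
  simp [h31, hp]

-- ===== VERDICT (by name: the statement is the Claim_ definition above) =====
theorem detect_charset_spec : Claim_equal_detect_charset := by
  intro s _
  unfold Spec_detect_charset detect_charset detect_charset_alt
  have c0 := fold_cond s.toList 0 1 rfl (by omega)
    (fun c => ("0123456789").toList.contains c)
    (fun c => by rw [pvMask_eq]; exact (maskOf_bits _ _ _ _ _).1)
  have c1 := fold_cond s.toList 1 2 rfl (by omega)
    (fun c => ("0123456789abcdefABCDEF").toList.contains c)
    (fun c => by rw [pvMask_eq]; exact (maskOf_bits _ _ _ _ _).2.1)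
  have c2 := fold_cond s.toList 2 4 rfl (by omega)
    (fun c => ("ABCDEFGHIJKLMNOPQRSTUVWXYZabcdefghijklmnopqrstuvwxyz0123456789-_").toList.contains c)
    (fun c => by rw [pvMask_eq]; exact (maskOf_bits _ _ _ _ _).2.2.1)
  have c3 := fold_cond s.toList 3 8 rfl (by omega)
    (fun c => ("ABCDEFGHIJKLMNOPQRSTUVWXYZabcdefghijklmnopqrstuvwxyz0123456789+/=").toList.contains c)
    (fun c => by rw [pvMask_eq]; exact (maskOf_bits _ _ _ _ _).2.2.2.1)
  have c4 := fold_cond s.toList 4 16 rfl (by omega)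
    (fun c => (("ABCDEFGHIJKLMNOPQRSTUVWXYZabcdefghijklmnopqrstuvwxyz0123456789" ++ "_-")).toList.contains c)
    (fun c => by rw [pvMask_eq]; exact (maskOf_bits _ _ _ _ _).2.2.2.2)
  simp only [c0, c1, c2, c3, c4]
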